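-- pv_equiv track=rewrite | github.com/reductstore/reduct-py | pkg/reduct/batch/v2.py | _apply_label_delta
-- ===== SOURCE A (Python) =====
-- def _parse_label_delta_ops(raw: str, label_names: list[str] | None) -> list[tuple[str, str | None]]:
--     ops: list[tuple[str, str | None]] = []
--     pos = 0
--     length = len(raw)
--
--     def _map_key(key: str) -> str:
--         if label_names is not None and key.isdigit():
--             idx = int(key)
--             if 0 <= idx < len(label_names):
--                 return label_names[idx]
--         return key
--
--     while pos < length:
--         while pos < length and raw[pos].isspace():
--             pos += 1
--         if pos >= length:
--             break
--
--         eq = raw.find("=", pos)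
--         if eq == -1:
--             break
--         key = _map_key(raw[pos:eq].strip())
--         pos = eq + 1
--
--         value: str | None = None
--         if pos < length and raw[pos] == '"':
--             pos += 1
--             end_quote = raw.find('"', pos)
--             if end_quote == -1:
--                 break
--             value = raw[pos:end_quote]
--             pos = end_quote + 1
--         else:
--             comma = raw.find(",", pos)
--             segment = raw[pos : comma if comma != -1 else length]
--             segment = segment.strip()
--             value = segment if segment else None
--             pos = length if comma == -1 else comma
--
--         ops.append((key, value))
--         if pos < length and raw[pos] == ",":
--             pos += 1
--
--     return ops
--
-- def _apply_label_delta(raw: str, base: dict[str, str], label_names: list[str] | None) -> dict[str, str]: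
--     labels = dict(base)
--     for key, value in _parse_label_delta_ops(raw, label_names):
--         if value is None:
--             labels.pop(key, None)
--         else:
--             labels[key] = value
--     return labels
-- ===== SOURCE B (Python) =====
-- def _apply_label_delta(raw: str, base: dict[str, str], label_names: list[str] | None) -> dict[str, str]:
--     # Single-pass character-indexed state machine: scans raw once, accumulating
--     # key/value characters and applying each completed op to the dict immediately
--     # (no intermediate ops list, no find()/slicing).
--     labels = dict(base)
--     n = len(raw)
--     i = 0
--     while i < n:
--         while i < n and raw[i].isspace():
--             i += 1
--         key_chars = []
--         while i < n and raw[i] != "=":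
--             key_chars.append(raw[i])
--             i += 1
--         if i >= n:
--             break  # no '=' found: stop
--         i += 1  # consume '='
--         key = "".join(key_chars).strip()
--         if label_names is not None and key.isdigit():
--             idx = int(key)
--             if 0 <= idx < len(label_names):
--                 key = label_names[idx]
--         if i < n and raw[i] == '"':
--             i += 1
--             val_chars = []
--             closed = False
--             while i < n:
--                 c = raw[i]
--                 i += 1
--                 if c == '"':
--                     closed = True
--                     break
--                 val_chars.append(c)
--             if not closed:
--                 break  # unterminated quote: stop without applying
--             labels[key] = "".join(val_chars)
--         else:
--             val_chars = []
--             while i < n and raw[i] != ",":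
--                 val_chars.append(raw[i])
--                 i += 1
--             seg = "".join(val_chars).strip()
--             if seg:
--                 labels[key] = seg
--             else:
--                 labels.pop(key, None)
--         if i < n and raw[i] == ",":
--             i += 1
--     return labels
-- ===== Notes on version B (the rewrite author's own statement) =====
-- stated objective: alternative
-- what changed: A parses raw with repeated str.find/slicing into an explicit ops list and then applies that list to the dict in a second loop; B is a single character-indexed state machine that walks raw once, accumulating key/value characters, and applies each completed op to the dict immediately (no ops list, no find/slice).
import Mathlib
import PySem

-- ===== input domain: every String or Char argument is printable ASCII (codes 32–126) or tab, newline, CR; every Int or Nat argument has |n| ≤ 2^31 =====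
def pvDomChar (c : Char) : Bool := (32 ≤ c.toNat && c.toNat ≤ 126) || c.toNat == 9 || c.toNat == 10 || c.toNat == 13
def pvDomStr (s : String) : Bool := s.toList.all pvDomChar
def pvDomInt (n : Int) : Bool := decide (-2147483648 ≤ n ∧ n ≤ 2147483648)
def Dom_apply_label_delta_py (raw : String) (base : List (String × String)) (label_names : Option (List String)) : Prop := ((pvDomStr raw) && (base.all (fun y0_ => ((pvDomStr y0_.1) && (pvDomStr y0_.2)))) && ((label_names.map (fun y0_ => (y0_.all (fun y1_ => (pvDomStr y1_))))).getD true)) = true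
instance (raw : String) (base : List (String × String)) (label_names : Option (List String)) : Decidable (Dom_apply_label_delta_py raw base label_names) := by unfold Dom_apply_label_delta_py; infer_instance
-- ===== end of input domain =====

-- B replaces A's find()/slice two-phase parser (build an ops list, then apply it) with a single
-- character-at-a-time state machine that applies each completed op to the dict immediately;
-- same return value (objective: alternative decomposition, no speed claim).

-- ===== PORT A =====
-- _map_key of _parse_label_delta_ops (A's nested helper)
def pvMapKeyA (label_names : Option (List String)) (key : String) : String :=
  match label_names with
  | none => key
  | some names =>
    if PySem.Chars.strIsdigit key.toList then
      match PySem.Int.ofChars? key.toList with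
      | none => key  -- unreachable: key.isdigit() guarantees int(key) parses
      | some idx =>
        if 0 ≤ idx ∧ idx < (names.length : Int) then
          PySem.List.pyGetD names idx key  -- in range, so = label_names[idx]
        else key
    else key

-- 'if pos < length and raw[pos] == ",": pos += 1' on the suffix view
def pvEatCommaA : List Char → List Char
  | ',' :: r => r
  | r => r

-- the while-loop of _parse_label_delta_ops; the index pos is represented by the suffix
-- raw[pos:], so raw.find(c, pos) is Chars.find on that suffix, slices raw[pos:eq] are
-- take/drop, and 'raw[pos] == c' is 'head? = some c'; fuel bounds the loop (each
-- iteration consumes at least the '=', so length + 1 is enough)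
def pvParseA (label_names : Option (List String)) : Nat → List Char → List (String × Option String)
  | 0, _ => []
  | fuel + 1, rest =>
    let r1 := List.dropWhile PySem.Chars.isspace rest   -- skip whitespace
    if r1.isEmpty then [] else                          -- 'if pos >= length: break'
    let eq := PySem.Chars.find r1 ['=']                 -- eq = raw.find("=", pos)
    if eq = -1 then [] else                             -- 'if eq == -1: break'
    let key := pvMapKeyA label_names (String.ofList (PySem.Chars.strip (r1.take eq.toNat)))
    let r2 := r1.drop (eq.toNat + 1)                    -- pos = eq + 1
    if r2.head? = some '"' then                         -- pos < length and raw[pos] == '"'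
      let r3 := r2.tail
      let endq := PySem.Chars.find r3 ['"']             -- end_quote = raw.find('"', pos)
      if endq = -1 then [] else                         -- unterminated quote: break
      (key, some (String.ofList (r3.take endq.toNat))) ::
        pvParseA label_names fuel (pvEatCommaA (r3.drop (endq.toNat + 1)))
    else                                                -- bare value up to ',' (or end)
      let comma := PySem.Chars.find r2 [',']
      let seg := PySem.Chars.strip (if comma = -1 then r2 else r2.take comma.toNat)
      let value := if seg.isEmpty then none else some (String.ofList seg)
      (key, value) ::
        pvParseA label_names fuel (pvEatCommaA (if comma = -1 then ([] : List Char) else r2.drop comma.toNat))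

-- the for-loop of _apply_label_delta
def pvApply1 (labels : PySem.Dict String String) (op : String × Option String) : PySem.Dict String String :=
  match op.2 with
  | none => labels.erase op.1          -- labels.pop(key, None)
  | some v => labels.insert op.1 v     -- labels[key] = value

def apply_label_delta_py (raw : String) (base : List (String × String)) (label_names : Option (List String)) : List (String × String) :=
  ((pvParseA label_names (raw.toList.length + 1) raw.toList).foldl pvApply1 (PySem.Dict.ofList base)).items

-- ===== PORT B =====
def pvMapKeyB (label_names : Option (List String)) (key : String) : String :=
  match label_names with
  | none => key
  | some names =>
    if PySem.Chars.strIsdigit key.toList then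
      match PySem.Int.ofChars? key.toList with
      | none => key  -- unreachable: key.isdigit() guarantees int(key) parses
      | some idx =>
        if 0 ≤ idx ∧ idx < (names.length : Int) then
          PySem.List.pyGetD names idx key
        else key
    else key

-- B's inner whitespace-skipping loop
def pvSkipWs : List Char → List Char
  | [] => []
  | c :: r => if PySem.Chars.isspace c then pvSkipWs r else c :: r

-- B's accumulate-until-t loop (key: t = '='; quoted value: t = '"');
-- none = input exhausted without seeing t (the 'break' cases)
def pvScanTo (t : Char) : List Char → Option (List Char × List Char)
  | [] => none
  | c :: r => if c = t then some ([], r)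
              else (pvScanTo t r).map (fun p => (c :: p.1, p.2))

-- B's accumulate-until-',' loop (the comma, if any, is left unconsumed)
def pvScanPlain : List Char → List Char × List Char
  | [] => ([], [])
  | c :: r => if c = ',' then ([], c :: r)
              else ((pvScanPlain r).1.cons c, (pvScanPlain r).2)

def pvEatCommaB : List Char → List Char
  | ',' :: r => r
  | r => r

-- B's single while-loop: scan one key=value and apply it to the dict immediately
def pvLoopB (label_names : Option (List String)) : Nat → List Char → PySem.Dict String String → PySem.Dict String String
  | 0, _, labels => labels
  | fuel + 1, rest, labels =>
    match pvScanTo '=' (pvSkipWs rest) with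
    | none => labels                                     -- no '=' before the end: stop
    | some (keyChars, r2) =>
      let key := pvMapKeyB label_names (String.ofList (PySem.Chars.strip keyChars))
      if r2.head? = some '"' then                        -- i < n and raw[i] == '"'
        match pvScanTo '"' r2.tail with
        | none => labels                                 -- unterminated quote: stop
        | some (valChars, r4) =>
          pvLoopB label_names fuel (pvEatCommaB r4) (labels.insert key (String.ofList valChars))
      else
        let (segChars, r4) := pvScanPlain r2
        let seg := PySem.Chars.strip segChars
        pvLoopB label_names fuel (pvEatCommaB r4)
          (if seg.isEmpty then labels.erase key else labels.insert key (String.ofList seg))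

def apply_label_delta_py_alt (raw : String) (base : List (String × String)) (label_names : Option (List String)) : List (String × String) :=
  (pvLoopB label_names (raw.toList.length + 1) raw.toList (PySem.Dict.ofList base)).items

-- ===== PRECONDITION & SPEC =====
def Spec_apply_label_delta_py (raw : String) (base : List (String × String)) (label_names : Option (List String)) (out : List (String × String)) : Prop := out = apply_label_delta_py_alt raw base label_names
instance (raw : String) (base : List (String × String)) (label_names : Option (List String)) (out : List (String × String)) : Decidable (Spec_apply_label_delta_py raw base label_names out) := by unfold Spec_apply_label_delta_py; infer_instance

-- ===== CLAIM (what is proved, stated in full; the proofs are below) =====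
def Claim_equal_apply_label_delta_py : Prop := ∀ (raw : String) (base : List (String × String)) (label_names : Option (List String)), Dom_apply_label_delta_py raw base label_names → Spec_apply_label_delta_py raw base label_names (apply_label_delta_py raw base label_names)

-- ===== LEMMAS AND PROOFS =====

theorem pvMapKeyB_eq : pvMapKeyB = pvMapKeyA := rfl

theorem pvEatCommaB_eq : pvEatCommaB = pvEatCommaA := rfl

theorem pvSkipWs_eq (cs : List Char) : pvSkipWs cs = List.dropWhile PySem.Chars.isspace cs := by
  induction cs with
  | nil => rfl
  | cons c r ih => simp only [pvSkipWs, List.dropWhile_cons]; split <;> simp_all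

theorem pv_tw_take (p : Char → Bool) (l : List Char) :
    l.take ((l.takeWhile p).length) = l.takeWhile p := by
  obtain ⟨r, hr⟩ := List.takeWhile_prefix (l := l) (p := p)
  have h := List.take_left (l₁ := l.takeWhile p) (l₂ := r)
  rw [hr] at h; exact h

theorem pv_tw_drop (p : Char → Bool) (l : List Char) :
    l.drop ((l.takeWhile p).length) = l.dropWhile p := by
  obtain ⟨r, hr⟩ := List.takeWhile_prefix (l := l) (p := p)
  have hd : l.dropWhile p = r := by
    have := List.takeWhile_append_dropWhile (p := p) (l := l)
    exact List.append_cancel_left (this.trans hr.symm)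
  have h := List.drop_left (l₁ := l.takeWhile p) (l₂ := r)
  rw [hr] at h; rw [h, hd]

-- single-character find: its position is the length of the longest (· ≠ t)-prefix
theorem pvFind_go_single (t : Char) (cs : List Char) : ∀ k : Nat,
    PySem.Chars.find.go [t] cs k =
      if t ∈ cs then ((k + (cs.takeWhile (· ≠ t)).length : Nat) : Int) else -1 := by
  induction cs with
  | nil => intro k; simp [PySem.Chars.find.go]
  | cons c r ih =>
    intro k
    rw [PySem.Chars.find.go]
    by_cases hc : c = t
    · subst hc; simp [List.isPrefixOf]
    · have hpre : [t].isPrefixOf (c :: r) = false := by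
        simp [List.isPrefixOf]; exact fun h => absurd h.symm hc
      simp only [hpre, ih (k + 1), List.mem_cons, List.takeWhile_cons]
      simp [hc, Ne.symm hc]
      split <;> [omega; rfl]

theorem pvFind_single (t : Char) (cs : List Char) :
    PySem.Chars.find cs [t] =
      if t ∈ cs then (((cs.takeWhile (· ≠ t)).length : Nat) : Int) else -1 := by
  rw [PySem.Chars.find, pvFind_go_single]; simp

theorem pvScanTo_tw (t : Char) (cs : List Char) :
    pvScanTo t cs =
      if t ∈ cs then some (cs.takeWhile (· ≠ t), (cs.dropWhile (· ≠ t)).tail) else none := by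
  induction cs with
  | nil => simp [pvScanTo]
  | cons c r ih =>
    by_cases hc : c = t
    · subst hc; simp [pvScanTo]
    · simp only [pvScanTo, hc, if_false, ih, List.mem_cons, List.takeWhile_cons, List.dropWhile_cons]
      simp [hc, Ne.symm hc]

-- B's key/quoted-value scan, phrased as A's find-then-slice step
theorem pvScanTo_eq (t : Char) (cs : List Char) :
    pvScanTo t cs =
      (if PySem.Chars.find cs [t] = -1 then none
       else some (cs.take (PySem.Chars.find cs [t]).toNat,
                  cs.drop ((PySem.Chars.find cs [t]).toNat + 1))) := by
  rw [pvScanTo_tw, pvFind_single]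
  by_cases h : t ∈ cs
  · rw [if_pos h, if_pos h, if_neg (by omega)]
    congr 1
    have hd : cs.drop ((cs.takeWhile (· ≠ t)).length + 1)
        = ((cs.drop ((cs.takeWhile (· ≠ t)).length)).drop 1) := by
      rw [List.drop_drop, Nat.add_comm]
    rw [Int.toNat_natCast, pv_tw_take, hd, pv_tw_drop, List.drop_one]
  · simp [h]

theorem pvScanPlain_tw (cs : List Char) :
    pvScanPlain cs = (cs.takeWhile (· ≠ ','), cs.dropWhile (· ≠ ',')) := by
  induction cs with
  | nil => simp [pvScanPlain]
  | cons c r ih =>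
    by_cases hc : c = ','
    · subst hc; simp [pvScanPlain]
    · simp only [pvScanPlain, hc, if_false, ih, List.takeWhile_cons, List.dropWhile_cons]
      simp [hc]

-- B's bare-value scan, phrased as A's find-then-slice step
theorem pvScanPlain_eq (cs : List Char) :
    pvScanPlain cs =
      (if PySem.Chars.find cs [','] = -1 then (cs, ([] : List Char))
       else (cs.take (PySem.Chars.find cs [',']).toNat,
             cs.drop (PySem.Chars.find cs [',']).toNat)) := by
  rw [pvScanPlain_tw, pvFind_single]
  by_cases h : ',' ∈ cs
  · rw [if_pos h, if_neg (by omega)]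
    rw [Int.toNat_natCast, pv_tw_take, pv_tw_drop]
  · rw [if_neg h, if_pos rfl, Prod.mk.injEq]
    constructor
    · exact List.takeWhile_eq_self_iff.mpr (fun x hx => by simp; rintro rfl; exact h hx)
    · exact List.dropWhile_eq_nil_iff.mpr (fun x hx => by simp; rintro rfl; exact h hx)

-- the core invariant: B's fused loop = A's parse followed by the fold applying the ops
theorem pvLoop_eq (label_names : Option (List String)) :
    ∀ (fuel : Nat) (rest : List Char) (labels : PySem.Dict String String),
    pvLoopB label_names fuel rest labels =
      (pvParseA label_names fuel rest).foldl pvApply1 labels := by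
  intro fuel
  induction fuel with
  | zero => intro rest labels; rfl
  | succ fuel ih =>
    intro rest labels
    rw [pvLoopB, pvParseA]
    simp only [pvSkipWs_eq, pvScanTo_eq, pvScanPlain_eq, pvMapKeyB_eq, pvEatCommaB_eq]
    by_cases hfind : PySem.Chars.find (List.dropWhile PySem.Chars.isspace rest) ['='] = -1
    · simp only [hfind, if_pos]
      split <;> rfl
    · have hne : (List.dropWhile PySem.Chars.isspace rest).isEmpty = false := by
        cases hcase : List.dropWhile PySem.Chars.isspace rest with
        | nil => exfalso; apply hfind; rw [hcase, pvFind_single]; simp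
        | cons a b => rfl
      simp only [hfind, hne, if_false, Bool.false_eq_true]
      set r1 := List.dropWhile PySem.Chars.isspace rest with hr1
      set r2 := r1.drop ((PySem.Chars.find r1 ['=']).toNat + 1) with hr2
      by_cases hhead : r2.head? = some '"'
      · simp only [hhead, if_true]
        by_cases hq : PySem.Chars.find r2.tail ['"'] = -1
        · simp only [hq, if_true]
          rfl
        · simp only [hq, if_false, List.foldl_cons, pvApply1, ih]
      · simp only [hhead, if_false]
        by_cases hc : PySem.Chars.find r2 [','] = -1
        · simp only [hc, if_true, List.foldl_cons, pvApply1, ih]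
          by_cases hseg : (PySem.Chars.strip r2).isEmpty
          · simp only [hseg, if_true]
          · simp only [hseg]
            rfl
        · simp only [hc, if_false, List.foldl_cons, pvApply1, ih]
          by_cases hseg : (PySem.Chars.strip (r2.take (PySem.Chars.find r2 [',']).toNat)).isEmpty
          · simp only [hseg, if_true]
          · simp only [hseg]
            rfl

-- ===== VERDICT (by name: the statement is the Claim_ definition above) =====
theorem apply_label_delta_py_spec : Claim_equal_apply_label_delta_py := by
  intro raw base label_names _
  unfold Spec_apply_label_delta_py apply_label_delta_py apply_label_delta_py_alt
  rw [pvLoop_eq]
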